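-- pv_equiv track=rewrite | github.com/sdurgut/HackerRank | Algorithms/TheMinionGame.py | minion_game
-- ===== SOURCE A (Python) =====
-- import itertools
--
-- def generate(s):
-- 	for i, j in itertools.combinations(range(len(s)+1), 2):
-- 		yield s[i:j]
--
-- def minion_game(string):
-- 	vovels = "AEIOU"
-- 	stuartScore = 0
-- 	kevinScore = 0
-- 	combinations = list(generate(string))
-- 	for substring in combinations:
-- 		if substring[0] in vovels:
-- 			kevinScore +=1
-- 		else:
-- 			stuartScore +=1
-- 	if kevinScore>stuartScore:
-- 		return "Kevin " + str(kevinScore)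
-- 	elif kevinScore<stuartScore:
-- 		return "Stuart " + str(stuartScore)
-- 	else:
-- 		return "Draw"
-- ===== SOURCE B (Python) =====
-- def minion_game(string):
--     n = len(string)
--     kevin = 0
--     stuart = 0
--     for i, c in enumerate(string):
--         if c in "AEIOU":
--             kevin += n - i
--         else:
--             stuart += n - i
--     if kevin > stuart:
--         return "Kevin " + str(kevin)
--     elif kevin < stuart:
--         return "Stuart " + str(stuart)
--     else:
--         return "Draw"
-- ===== Notes on version B (the rewrite author's own statement) =====
-- stated objective: faster
-- what changed: Instead of materialising every substring and counting them one by one, B adds in a single pass over the characters the count n-i of substrings starting at position i to the player owning string[i].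
import Mathlib
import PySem

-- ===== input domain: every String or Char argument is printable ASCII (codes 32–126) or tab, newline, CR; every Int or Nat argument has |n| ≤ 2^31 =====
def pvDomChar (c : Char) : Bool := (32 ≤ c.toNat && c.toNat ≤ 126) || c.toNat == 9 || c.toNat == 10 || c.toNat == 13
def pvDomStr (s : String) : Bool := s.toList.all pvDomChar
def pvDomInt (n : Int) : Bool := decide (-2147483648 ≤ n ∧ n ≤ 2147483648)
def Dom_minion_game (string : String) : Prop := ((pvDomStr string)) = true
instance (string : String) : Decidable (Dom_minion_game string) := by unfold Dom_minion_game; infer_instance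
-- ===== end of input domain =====

-- A materialises every substring (O(n^2)) and scores each by its first letter; B instead
-- scores each position i once with weight n-i in a single O(n) pass (asymptotically faster).

-- ===== PORT A =====
-- generate(s): s[i:j] for (i,j) in itertools.combinations(range(len(s)+1), 2)
def pvGenerate (s : List Char) : List (List Char) :=
  (PySem.List.pyRange 0 ((s.length : Int) + 1) 1).flatMap fun i =>
    (PySem.List.pyRange (i + 1) ((s.length : Int) + 1) 1).map fun j =>
      PySem.List.slice s (some i) (some j)

-- loop body: substring[0] in "AEIOU" → kevin else stuart; substring[0] never raises
-- (every generated slice is nonempty), so the `none` arm is unreachable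
def pvAstep (st : Int × Int) (substring : List Char) : Int × Int :=
  match substring.head? with
  | some c => if c ∈ ['A', 'E', 'I', 'O', 'U'] then (st.1, st.2 + 1) else (st.1 + 1, st.2)
  | none => (st.1 + 1, st.2)

def minion_game (string : String) : String :=
  let s := string.toList
  let combinations := pvGenerate s
  let scores := combinations.foldl pvAstep (0, 0)   -- (stuartScore, kevinScore)
  if scores.2 > scores.1 then "Kevin " ++ PySem.Int.toStr scores.2
  else if scores.2 < scores.1 then "Stuart " ++ PySem.Int.toStr scores.1
  else "Draw"

-- ===== PORT B =====
-- loop body: the character at index i scores n - i for its player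
def pvBstep (n : Int) (st : Int × Int) (p : Int × Char) : Int × Int :=
  if p.2 ∈ ['A', 'E', 'I', 'O', 'U'] then (st.1, st.2 + (n - p.1)) else (st.1 + (n - p.1), st.2)

def minion_game_alt (string : String) : String :=
  let cs := string.toList
  let n : Int := (cs.length : Int)
  let scores := (PySem.List.enumerate cs 0).foldl (pvBstep n) (0, 0)   -- (stuart, kevin)
  if scores.2 > scores.1 then "Kevin " ++ PySem.Int.toStr scores.2
  else if scores.2 < scores.1 then "Stuart " ++ PySem.Int.toStr scores.1
  else "Draw"

-- ===== PRECONDITION & SPEC =====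
def Spec_minion_game (string : String) (out : String) : Prop := out = minion_game_alt string
instance (string : String) (out : String) : Decidable (Spec_minion_game string out) := by unfold Spec_minion_game; infer_instance

-- ===== CLAIM (what is proved, stated in full; the proofs are below) =====
def Claim_equal_minion_game : Prop := ∀ (string : String), Dom_minion_game string → Spec_minion_game string (minion_game string)

-- ===== LEMMAS AND PROOFS =====

-- the combined effect of all substrings starting at index i (there are n - i of them)
def pvFstep (cs : List Char) (st : Int × Int) (i : Int) : Int × Int :=
  if cs.getD i.toNat ' ' ∈ ['A', 'E', 'I', 'O', 'U'] then (st.1, st.2 + ((cs.length : Int) - i))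
  else (st.1 + ((cs.length : Int) - i), st.2)

lemma pv_head_slice (cs : List Char) (i j : Int) (h0 : 0 ≤ i) (hij : i < j) (hn : i < (cs.length : Int)) :
    (PySem.List.slice cs (some i) (some j)).head? = some (cs.getD i.toNat ' ') := by
  rw [PySem.List.slice_toNat cs h0 (le_of_lt (lt_of_le_of_lt h0 hij))]
  rw [List.head?_take, List.head?_drop]
  have h1 : i.toNat < j.toNat := by omega
  have h2 : i.toNat < cs.length := by omega
  simp [Nat.sub_ne_zero_of_lt h1, List.getElem?_eq_getElem h2]

lemma pv_foldl_const_kevin {α : Type} (l : List α) (st : Int × Int) :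
    l.foldl (fun st _ => ((st.1 : Int), st.2 + 1)) st = (st.1, st.2 + l.length) := by
  induction l generalizing st with
  | nil => simp
  | cons a l ih => simp [List.foldl_cons, ih]; ring

lemma pv_foldl_const_stuart {α : Type} (l : List α) (st : Int × Int) :
    l.foldl (fun st _ => ((st.1 : Int) + 1, st.2)) st = (st.1 + l.length, st.2) := by
  induction l generalizing st with
  | nil => simp
  | cons a l ih => simp [List.foldl_cons, ih]; ring

-- inner loop: all slices that start at i score the same player, once per slice
lemma pv_inner (cs : List Char) (i : Int) (h0 : 0 ≤ i) (hn : i < (cs.length : Int)) (st : Int × Int) :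
    ((PySem.List.pyRange (i + 1) ((cs.length : Int) + 1) 1).map fun j =>
      PySem.List.slice cs (some i) (some j)).foldl pvAstep st = pvFstep cs st i := by
  rw [List.foldl_map]
  by_cases hv : cs.getD i.toNat ' ' ∈ ['A', 'E', 'I', 'O', 'U']
  · rw [PySem.List.foldl_congr_mem _ _ (fun acc _ => ((acc.1 : Int), acc.2 + 1)) st
      (by
        intro acc j hj
        have hb := (PySem.List.mem_pyRange_one).1 hj
        rw [pvAstep, pv_head_slice cs i j h0 (by omega) hn]
        simp only [List.getD_eq_getElem?_getD] at hv
        simp [hv])]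
    rw [pv_foldl_const_kevin, PySem.List.length_pyRange_one, pvFstep, if_pos hv]
    have : (((cs.length : Int) + 1 - (i + 1)).toNat : Int) = (cs.length : Int) - i := by omega
    rw [this]
  · rw [PySem.List.foldl_congr_mem _ _ (fun acc _ => ((acc.1 : Int) + 1, acc.2)) st
      (by
        intro acc j hj
        have hb := (PySem.List.mem_pyRange_one).1 hj
        rw [pvAstep, pv_head_slice cs i j h0 (by omega) hn]
        simp only [List.getD_eq_getElem?_getD] at hv
        simp [hv])]
    rw [pv_foldl_const_stuart, PySem.List.length_pyRange_one, pvFstep, if_neg hv]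
    have : (((cs.length : Int) + 1 - (i + 1)).toNat : Int) = (cs.length : Int) - i := by omega
    rw [this]

-- A's whole fold, re-expressed as one pass over the start indices
lemma pv_A_fold (cs : List Char) :
    (pvGenerate cs).foldl pvAstep (0, 0) =
    (PySem.List.pyRange 0 (cs.length : Int) 1).foldl (pvFstep cs) (0, 0) := by
  rw [pvGenerate, List.foldl_flatMap]
  rw [PySem.List.pyRange_one_succ_right (by positivity), List.foldl_append]
  simp only [List.foldl_cons, List.foldl_nil,
    PySem.List.pyRange_one_eq_nil (le_refl ((cs.length : Int) + 1)), List.map_nil]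
  exact PySem.List.foldl_congr_mem _ _ (pvFstep cs) (0, 0) (by
    intro acc i hi
    have hb := (PySem.List.mem_pyRange_one).1 hi
    exact pv_inner cs i hb.1 hb.2 acc)

-- the index pass equals B's enumerate pass, suffix by suffix
lemma pv_index_enum (cs : List Char) :
    ∀ (m k : Nat), cs.length - k = m → k ≤ cs.length → ∀ (st : Int × Int),
    (PySem.List.pyRange (k : Int) (cs.length : Int) 1).foldl (pvFstep cs) st =
    (PySem.List.enumerate (cs.drop k) (k : Int)).foldl (pvBstep (cs.length : Int)) st := by
  intro m
  induction m with
  | zero =>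
    intro k hm hk st
    have hkl : k = cs.length := by omega
    rw [PySem.List.pyRange_one_eq_nil (by omega), hkl, List.drop_length,
      PySem.List.enumerate_nil]
    rfl
  | succ m ih =>
    intro k hm hk st
    have hlt : k < cs.length := by omega
    rw [PySem.List.pyRange_one_cons (by exact_mod_cast hlt), List.drop_eq_getElem_cons hlt,
      PySem.List.enumerate_cons, List.foldl_cons, List.foldl_cons]
    have hstep : pvFstep cs st (k : Int) = pvBstep (cs.length : Int) st ((k : Int), cs[k]) := by
      rw [pvFstep, pvBstep]
      simp [List.getElem?_eq_getElem hlt]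
    rw [hstep]
    have := ih (k + 1) (by omega) (by omega) (pvBstep (cs.length : Int) st ((k : Int), cs[k]))
    push_cast at this ⊢
    exact this

-- ===== VERDICT (by name: the statement is the Claim_ definition above) =====
theorem minion_game_spec : Claim_equal_minion_game := by
  intro string _
  unfold Spec_minion_game
  simp only [minion_game, minion_game_alt]
  rw [pv_A_fold]
  have h := pv_index_enum string.toList (string.toList.length) 0 (by omega) (Nat.zero_le _) (0, 0)
  simp only [Nat.cast_zero, List.drop_zero] at h
  rw [h]
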